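-- pv_equiv track=rewrite | github.com/vijayvenkatesan005/snake_sequence | snake_sequence.py | snake_sequence
-- ===== SOURCE A (Python) =====
-- def snake_sequence_helper(grid, i, j, m, n, down_value_list, right_value_list):
--
--     down_value_list = list()
--     down_value_list.append(grid[i][j])
--
--     right_value_list = list()
--     right_value_list.append(grid[i][j])
--
--     if i + 1 <= m and (grid[i][j] + 1 == grid[i+1][j]
--     or grid[i][j] - 1 == grid[i+1][j]):
--
--         to_be_extended = snake_sequence_helper(grid, i + 1, j, m, n,
--         down_value_list, right_value_list)
--
--         down_value_list.extend(to_be_extended)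
--
--     if j + 1 <= n and (grid[i][j] + 1 == grid[i][j+1]
--     or grid[i][j] - 1 == grid[i][j+1]):
--
--         to_be_extended = snake_sequence_helper(grid, i, j + 1, m, n,
--         down_value_list, right_value_list)
--
--         right_value_list.extend(to_be_extended)
--
--     if sum(down_value_list) >= sum(right_value_list):
--
--         return down_value_list
--
--     else:
--
--         return right_value_list
--
-- def snake_sequence(grid):
--
--     m = len(grid) - 1
--     n = len(grid[0]) - 1
--
--     maximum_value_path = 0
--     result = list()
--
--     for i in range(len(grid)):
--         for j in range(len(grid[i])):
--
--             current_path = snake_sequence_helper(grid, i, j, m, n, [], [])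
--             current_value_path = sum(current_path)
--
--             if current_value_path > maximum_value_path:
--
--                 maximum_value_path = current_value_path
--                 result = current_path[:]
--
--     return result
-- ===== SOURCE B (Python) =====
-- def snake_sequence(grid):
--     m, n = len(grid), len(grid[0])
--     best = {}
--     for i in range(m - 1, -1, -1):
--         for j in range(n - 1, -1, -1):
--             v = grid[i][j]
--             if i + 1 < m and abs(grid[i + 1][j] - v) == 1:
--                 s, p = best[(i + 1, j)]
--                 down = (v + s, [v] + p)
--             else:
--                 down = (v, [v])
--             if j + 1 < n and abs(grid[i][j + 1] - v) == 1:
--                 s, p = best[(i, j + 1)]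
--                 right = (v + s, [v] + p)
--             else:
--                 right = (v, [v])
--             best[(i, j)] = down if down[0] >= right[0] else right
--     biggest, result = 0, []
--     for i in range(m):
--         for j in range(n):
--             s, p = best[(i, j)]
--             if s > biggest:
--                 biggest, result = s, p
--     return result
-- ===== Notes on version B (the rewrite author's own statement) =====
-- stated objective: alternative
-- what changed: A recomputes the best snake path from every cell by an unmemoised branching recursion; B fills a dict bottom-up and right-to-left with the (sum, path) of the best snake starting at each cell, so each cell is computed once from its down/right neighbours, then scans for the maximum.
-- outside the precondition, e.g. on snake_sequence([[], [9, 7], [-3, 1463], [-1, 4591]]): A returns [4591], B returns []; on snake_sequence([[5], [1, 2]]): A returns [5], B returns [5]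
import Mathlib
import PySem

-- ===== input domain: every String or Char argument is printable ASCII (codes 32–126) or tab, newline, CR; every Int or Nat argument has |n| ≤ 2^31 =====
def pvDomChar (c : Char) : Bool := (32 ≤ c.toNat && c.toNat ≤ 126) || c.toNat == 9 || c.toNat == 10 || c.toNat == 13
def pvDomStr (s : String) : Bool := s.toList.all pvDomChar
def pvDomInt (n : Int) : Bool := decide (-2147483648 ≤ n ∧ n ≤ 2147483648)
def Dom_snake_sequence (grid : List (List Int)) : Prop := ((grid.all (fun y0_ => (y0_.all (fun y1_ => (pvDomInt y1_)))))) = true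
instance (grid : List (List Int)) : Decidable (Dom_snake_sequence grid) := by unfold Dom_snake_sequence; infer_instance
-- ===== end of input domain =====

-- B replaces A's per-cell branching recursion by a bottom-up memoised DP: a dict holding the
-- (sum, path) of the best snake starting at each cell, filled right-to-left, bottom-to-top; the
-- proved equivalence is about the return value only.

-- ===== PORT A =====
-- literal transliteration of snake_sequence_helper (its two list parameters are dead: A
-- overwrites them immediately on entry, so the pure recursion carries only grid, m, n, i, j)
def snakeHelperA (grid : List (List Int)) (m n i j : Nat) : List Int :=
  let v := (grid.getD i []).getD j 0
  let down0 : List Int := [v]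
  let right0 : List Int := [v]
  let down :=
    if _h : i + 1 ≤ m ∧ (v + 1 = (grid.getD (i+1) []).getD j 0 ∨ v - 1 = (grid.getD (i+1) []).getD j 0)
    then down0 ++ snakeHelperA grid m n (i+1) j else down0
  let right :=
    if _h : j + 1 ≤ n ∧ (v + 1 = (grid.getD i []).getD (j+1) 0 ∨ v - 1 = (grid.getD i []).getD (j+1) 0)
    then right0 ++ snakeHelperA grid m n i (j+1) else right0
  if down.sum ≥ right.sum then down else right
termination_by (m - i) + (n - j)
decreasing_by
  · omega
  · omega

def snake_sequence (grid : List (List Int)) : List Int :=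
  let m := grid.length - 1
  let n := (grid.getD 0 []).length - 1
  ((List.range grid.length).foldl (fun (st : Int × List Int) i =>
      (List.range (grid.getD i []).length).foldl (fun st j =>
        let cur := snakeHelperA grid m n i j
        let s := cur.sum
        if s > st.1 then (s, cur) else st) st) ((0 : Int), ([] : List Int))).2

-- ===== PORT B =====
-- one DP cell: (best sum, best path) of the snake starting at (i, j), read off the memo
def snakeCellB (grid : List (List Int)) (m n : Nat)
    (best : PySem.Dict (Nat × Nat) (Int × List Int)) (i j : Nat) : Int × List Int :=
  let v := (grid.getD i []).getD j 0
  let down :=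
    if i + 1 < m ∧ ((grid.getD (i+1) []).getD j 0 - v).natAbs = 1
    then let p := best.getD (i+1, j) (0, []); (v + p.1, v :: p.2)
    else (v, [v])
  let right :=
    if j + 1 < n ∧ ((grid.getD i []).getD (j+1) 0 - v).natAbs = 1
    then let p := best.getD (i, j+1) (0, []); (v + p.1, v :: p.2)
    else (v, [v])
  if down.1 ≥ right.1 then down else right

def snake_sequence_alt (grid : List (List Int)) : List Int :=
  let m := grid.length
  let n := (grid.getD 0 []).length
  let best := (List.range m).reverse.foldl (fun best i =>
      (List.range n).reverse.foldl (fun best j =>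
        best.insert (i, j) (snakeCellB grid m n best i j)) best)
    (PySem.Dict.empty : PySem.Dict (Nat × Nat) (Int × List Int))
  ((List.range m).foldl (fun (st : Int × List Int) i =>
      (List.range n).foldl (fun st j =>
        let p := best.getD (i, j) (0, [])
        if p.1 > st.1 then (p.1, p.2) else st) st) ((0 : Int), ([] : List Int))).2

-- ===== PRECONDITION & SPEC =====
-- Pre_ excludes the empty grid (A evaluates grid[0]: IndexError) and ragged grids, on which A's
-- column bound, taken from row 0 alone, generally raises IndexError and any returned value is an
-- accident of which ±1-adjacencies happen to occur.
def Pre_snake_sequence (grid : List (List Int)) : Prop :=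
  grid ≠ [] ∧ ∀ r ∈ grid, r.length = (grid.headD []).length
instance (grid : List (List Int)) : Decidable (Pre_snake_sequence grid) := by
  unfold Pre_snake_sequence; infer_instance
def pvWitness_snake_sequence : List (List Int) := [[1, 2], [4, 3]]
def Spec_snake_sequence (grid : List (List Int)) (out : List Int) : Prop := out = snake_sequence_alt grid
instance (grid : List (List Int)) (out : List Int) : Decidable (Spec_snake_sequence grid out) := by unfold Spec_snake_sequence; infer_instance

-- ===== CLAIM (what is proved, stated in full; the proofs are below) =====
def Claim_equal_snake_sequence : Prop := ∀ (grid : List (List Int)), Dom_snake_sequence grid → Pre_snake_sequence grid → Spec_snake_sequence grid (snake_sequence grid)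

-- ===== LEMMAS AND PROOFS =====

-- the value B memoises for cell (a, b): A's helper path at (a, b) together with its sum
def snakeVal (grid : List (List Int)) (m n a b : Nat) : Int × List Int :=
  ((snakeHelperA grid (m-1) (n-1) a b).sum, snakeHelperA grid (m-1) (n-1) a b)

-- unfolding equation of A's helper, stated once for rewriting
theorem snakeHelperA_eq (grid : List (List Int)) (m n i j : Nat) :
    snakeHelperA grid m n i j =
      (let v := (grid.getD i []).getD j 0
       let down :=
         if i + 1 ≤ m ∧ (v + 1 = (grid.getD (i+1) []).getD j 0 ∨ v - 1 = (grid.getD (i+1) []).getD j 0)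
         then [v] ++ snakeHelperA grid m n (i+1) j else [v]
       let right :=
         if j + 1 ≤ n ∧ (v + 1 = (grid.getD i []).getD (j+1) 0 ∨ v - 1 = (grid.getD i []).getD (j+1) 0)
         then [v] ++ snakeHelperA grid m n i (j+1) else [v]
       if down.sum ≥ right.sum then down else right) := by
  rw [snakeHelperA]
  simp only [dite_eq_ite]

-- the DP cell computes exactly A's helper value, given a memo correct below and to the right
theorem snakeCellB_correct (grid : List (List Int)) (m n i j : Nat)
    (best : PySem.Dict (Nat × Nat) (Int × List Int))
    (hd : i + 1 < m → best.getD (i+1, j) (0, []) = snakeVal grid m n (i+1) j)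
    (hr : j + 1 < n → best.getD (i, j+1) (0, []) = snakeVal grid m n i (j+1)) :
    snakeCellB grid m n best i j = snakeVal grid m n i j := by
  unfold snakeVal
  rw [snakeHelperA_eq grid (m-1) (n-1) i j]
  dsimp only [snakeCellB]
  generalize (grid.getD i []).getD j 0 = v
  generalize (grid.getD (i+1) []).getD j 0 = x at hd ⊢
  generalize (grid.getD i []).getD (j+1) 0 = y at hr ⊢
  have hgd : (i + 1 < m ∧ (x - v).natAbs = 1) ↔ (i + 1 ≤ m - 1 ∧ (v + 1 = x ∨ v - 1 = x)) := by omega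
  have hgr : (j + 1 < n ∧ (y - v).natAbs = 1) ↔ (j + 1 ≤ n - 1 ∧ (v + 1 = y ∨ v - 1 = y)) := by omega
  by_cases h1 : i + 1 < m ∧ (x - v).natAbs = 1 <;>
  by_cases h2 : j + 1 < n ∧ (y - v).natAbs = 1
  · rw [if_pos h1, if_pos h2, if_pos (hgd.mp h1), if_pos (hgr.mp h2),
      hd h1.1, hr h2.1]
    unfold snakeVal
    simp only [List.sum_append, List.sum_cons, List.sum_nil]
    by_cases hc : v + (snakeHelperA grid (m-1) (n-1) (i+1) j).sum ≥ v + (snakeHelperA grid (m-1) (n-1) i (j+1)).sum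
    · rw [if_pos hc, if_pos (by omega : v + 0 + (snakeHelperA grid (m-1) (n-1) (i+1) j).sum ≥ v + 0 + (snakeHelperA grid (m-1) (n-1) i (j+1)).sum)]
      simp
    · rw [if_neg hc, if_neg (by omega : ¬ (v + 0 + (snakeHelperA grid (m-1) (n-1) (i+1) j).sum ≥ v + 0 + (snakeHelperA grid (m-1) (n-1) i (j+1)).sum))]
      simp
  · rw [if_pos h1, if_neg h2, if_pos (hgd.mp h1), if_neg (fun c => h2 (hgr.mpr c)), hd h1.1]
    unfold snakeVal
    simp
    split <;> simp
  · rw [if_neg h1, if_pos h2, if_neg (fun c => h1 (hgd.mpr c)), if_pos (hgr.mp h2), hr h2.1]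
    unfold snakeVal
    simp
    split <;> simp
  · rw [if_neg h1, if_neg h2, if_neg (fun c => h1 (hgd.mpr c)), if_neg (fun c => h2 (hgr.mpr c))]
    simp

-- inner fold invariant: processing row k for columns jc-1 … 0 completes the row and preserves rows below
theorem snakeRow_correct (grid : List (List Int)) (m n k : Nat) :
    ∀ (jc : Nat), jc ≤ n → ∀ (best : PySem.Dict (Nat × Nat) (Int × List Int)),
      (∀ a b, a < m → b < n → k < a → best.getD (a, b) (0, []) = snakeVal grid m n a b) →
      (∀ b, jc ≤ b → b < n → best.getD (k, b) (0, []) = snakeVal grid m n k b) →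
      (∀ a b, a < m → b < n → k < a →
        ((List.range jc).reverse.foldl (fun best j => best.insert (k, j) (snakeCellB grid m n best k j)) best).getD (a, b) (0, []) = snakeVal grid m n a b) ∧
      (∀ b, b < n →
        ((List.range jc).reverse.foldl (fun best j => best.insert (k, j) (snakeCellB grid m n best k j)) best).getD (k, b) (0, []) = snakeVal grid m n k b) := by
  intro jc
  induction jc with
  | zero =>
    intro _ best H1 H2
    simp only [List.range_zero, List.reverse_nil, List.foldl_nil]
    exact ⟨H1, fun b hb => H2 b (Nat.zero_le b) hb⟩
  | succ jc ih =>
    intro hjc best H1 H2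
    rw [List.range_succ, List.reverse_append]
    simp only [List.reverse_cons, List.reverse_nil, List.nil_append, List.cons_append,
      List.foldl_cons]
    apply ih (by omega)
    · intro a b ha hb hka
      rw [PySem.Dict.getD_insert]
      rw [if_neg (by intro h; injection h with h1 h2; omega)]
      exact H1 a b ha hb hka
    · intro b hjb hb
      by_cases hbe : b = jc
      · subst hbe
        rw [PySem.Dict.getD_insert, if_pos rfl]
        apply snakeCellB_correct
        · intro h; exact H1 (k+1) b h hb (by omega)
        · intro h; exact H2 (b+1) (by omega) h
      · rw [PySem.Dict.getD_insert, if_neg (by intro h; injection h with h1 h2; omega)]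
        exact H2 b (by omega) hb

-- outer fold invariant: after processing rows ic-1 … 0, every cell of those rows is memoised
theorem snakeGrid_correct (grid : List (List Int)) (m n : Nat) :
    ∀ (ic : Nat), ic ≤ m → ∀ (best : PySem.Dict (Nat × Nat) (Int × List Int)),
      (∀ a b, a < m → b < n → ic ≤ a → best.getD (a, b) (0, []) = snakeVal grid m n a b) →
      ∀ a b, a < m → b < n →
        ((List.range ic).reverse.foldl (fun best i =>
            (List.range n).reverse.foldl (fun best j =>
              best.insert (i, j) (snakeCellB grid m n best i j)) best) best).getD (a, b) (0, []) =
          snakeVal grid m n a b := by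
  intro ic
  induction ic with
  | zero =>
    intro _ best H a b ha hb
    simp only [List.range_zero, List.reverse_nil, List.foldl_nil]
    exact H a b ha hb (Nat.zero_le a)
  | succ ic ih =>
    intro hic best H a b ha hb
    rw [List.range_succ, List.reverse_append]
    simp only [List.reverse_cons, List.reverse_nil, List.nil_append, List.cons_append,
      List.foldl_cons]
    apply ih (by omega)
    · intro a' b' ha' hb' hia'
      have hrow := snakeRow_correct grid m n ic n (le_refl n) best
        (fun a b ha hb hk => H a b ha hb (by omega))
        (fun b hnb hb => absurd hb (by omega))
      rcases Nat.lt_or_ge ic a' with h | h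
      · exact hrow.1 a' b' ha' hb' h
      · have : a' = ic := by omega
        subst this
        exact hrow.2 b' hb'
    · exact ha
    · exact hb

theorem snake_eq (grid : List (List Int)) (hne : grid ≠ [])
    (hrect : ∀ r ∈ grid, r.length = (grid.headD []).length) :
    snake_sequence grid = snake_sequence_alt grid := by
  unfold snake_sequence snake_sequence_alt
  dsimp only
  have hhead : grid.headD [] = grid.getD 0 [] := by cases grid <;> simp [List.getD]
  have hbest := snakeGrid_correct grid grid.length ((grid.getD 0 []).length)
      grid.length (le_refl _) PySem.Dict.empty
      (fun a b ha hb hma => absurd ha (by omega))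
  congr 1
  apply PySem.List.foldl_congr_mem'
  intro i hi st
  have hi' : i < grid.length := by simpa using hi
  have hlen : (grid.getD i []).length = (grid.getD 0 []).length := by
    rw [← hhead, List.getD_eq_getElem grid [] hi']
    exact hrect _ (List.getElem_mem hi')
  rw [hlen]
  apply PySem.List.foldl_congr_mem'
  intro j hj st'
  have hj' : j < (grid.getD 0 []).length := by simpa using hj
  rw [hbest i j hi' hj']
  simp [snakeVal]

-- ===== VERDICT (by name: the statement is the Claim_ definition above) =====
theorem snake_sequence_spec : Claim_equal_snake_sequence := by
  intro grid _ hpre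
  unfold Spec_snake_sequence
  exact snake_eq grid hpre.1 hpre.2
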